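-- pv_equiv track=rewrite | github.com/ReynoldZhao/ReyRay-LC-Practice-ForManyOffers | Leetcode_python/OA/VO/OA-TT.py | minimumResistancePath
-- ===== SOURCE A (Python) =====
-- from typing import Collection, List, Optional
--
-- def minimumResistancePath(matrix: List[List[int]]):
--     m = len(matrix)
--     n = len(matrix[0])
--
--     dp = [matrix[i][0] for i in range(m)]
--
--     for i in range(1, n):
--         tmp_dp = [0 for i in range(m)]
--         for j in range(m):
--             if j == 0:
--                 tmp_dp[j] = matrix[j][i] + min(dp[j], dp[j + 1])
--             elif j == m - 1:
--                 tmp_dp[j] = matrix[j][i] + min(dp[j], dp[j - 1])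
--             else:
--                 tmp_dp[j] = matrix[j][i] + min(dp[j], dp[j-1], dp[j + 1])
--         dp = tmp_dp
--
--     return min(dp)
-- ===== SOURCE B (Python) =====
-- def minimumResistancePath(matrix):
--     m, n = len(matrix), len(matrix[0])
--     memo = {}
--
--     def cost(row, col):
--         # minimum resistance from matrix[row][col] to the last column
--         if col == n - 1:
--             return matrix[row][col]
--         key = (row, col)
--         if key in memo:
--             return memo[key]
--         best = cost(row, col + 1)
--         if row > 0:
--             best = min(best, cost(row - 1, col + 1))
--         if row < m - 1:
--             best = min(best, cost(row + 1, col + 1))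
--         v = matrix[row][col] + best
--         memo[key] = v
--         return v
--
--     return min(cost(r, 0) for r in range(m))
-- ===== Notes on version B (the rewrite author's own statement) =====
-- stated objective: alternative
-- what changed: B replaces A's bottom-up column-by-column iteration with a rolling dp array by a top-down recursive helper cost(row,col) (minimum resistance from that cell to the last column) memoized in a dict keyed by (row,col), with the answer read as min(cost(r,0)) over starting rows; same recurrence, iterative-vs-recursive decomposition.
-- crash fix: On single-row matrices with at least 2 columns A raises IndexError (dp[j+1] with m==1), while B returns the row sum, the evident intended value. — e.g. on minimumResistancePath([[1, 2, 3]]): A raises IndexError, B returns 6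
import Mathlib
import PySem

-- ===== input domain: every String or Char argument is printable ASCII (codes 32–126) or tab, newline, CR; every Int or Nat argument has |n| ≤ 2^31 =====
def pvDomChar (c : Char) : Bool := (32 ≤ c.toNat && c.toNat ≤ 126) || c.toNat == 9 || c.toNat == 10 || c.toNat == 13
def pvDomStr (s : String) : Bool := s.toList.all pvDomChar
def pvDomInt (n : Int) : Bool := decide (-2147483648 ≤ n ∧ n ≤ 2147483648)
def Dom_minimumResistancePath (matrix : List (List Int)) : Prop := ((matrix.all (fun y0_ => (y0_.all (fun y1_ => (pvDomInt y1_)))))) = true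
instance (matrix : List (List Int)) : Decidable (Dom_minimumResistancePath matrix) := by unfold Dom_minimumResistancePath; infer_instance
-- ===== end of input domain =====

-- B replaces A's bottom-up rolling-array iteration by a top-down recursive helper cost(row, col)
-- memoized in a dict keyed by (row, col): same recurrence, a different (recursive) decomposition.

-- ===== PORT A =====
-- one DP step of A: column i, with A's three boundary branches (getD stands for Python indexing,
-- which is in range on every input admitted by Pre_)
def pvStepA (matrix : List (List Int)) (m : Nat) (dp : List Int) (i : Nat) : List Int :=
  (List.range m).map (fun j =>
    if j = 0 then
      (matrix.getD j []).getD i 0 + min (dp.getD j 0) (dp.getD (j + 1) 0)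
    else if j = m - 1 then
      (matrix.getD j []).getD i 0 + min (dp.getD j 0) (dp.getD (j - 1) 0)
    else
      (matrix.getD j []).getD i 0 + min (dp.getD j 0) (min (dp.getD (j - 1) 0) (dp.getD (j + 1) 0)))

def minimumResistancePath (matrix : List (List Int)) : Int :=
  let m := matrix.length
  let n := (matrix.headD []).length
  let dp0 := (List.range m).map (fun i => (matrix.getD i []).getD 0 0)
  let dp := (List.range (n - 1)).foldl (fun dp k => pvStepA matrix m dp (k + 1)) dp0
  (dp.min?).getD 0

-- ===== PORT B =====
-- B's helper cost(row, col), memoized in a dict keyed by (row, col); the recursion on col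
-- (terminating at col = n-1) is carried by rem = n-1-col, so col = n-1-rem. The two
-- neighbor branches 'if row > 0' / 'if row < m-1' thread the memo in evaluation order,
-- exactly as the Python calls do.
def pvCost (matrix : List (List Int)) (m n : Nat) :
    Nat → Nat → PySem.Dict (Nat × Nat) Int → Int × PySem.Dict (Nat × Nat) Int
  | 0, row, memo => ((matrix.getD row []).getD (n - 1) 0, memo)
  | rem + 1, row, memo =>
      match memo.get? (row, n - 1 - (rem + 1)) with
      | some v => (v, memo)
      | none =>
          let p0 := pvCost matrix m n rem row memo
          let p1 := if 0 < row then
              let q := pvCost matrix m n rem (row - 1) p0.2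
              (min p0.1 q.1, q.2)
            else p0
          let p2 := if row < m - 1 then
              let q := pvCost matrix m n rem (row + 1) p1.2
              (min p1.1 q.1, q.2)
            else p1
          let v := (matrix.getD row []).getD (n - 1 - (rem + 1)) 0 + p2.1
          (v, p2.2.insert (row, n - 1 - (rem + 1)) v)

-- min(cost(r, 0) for r in range(m)): the generator's calls share the memo in row order
def pvCostRows (matrix : List (List Int)) (m n rem : Nat) :
    List Nat → PySem.Dict (Nat × Nat) Int → List Int × PySem.Dict (Nat × Nat) Int
  | [], memo => ([], memo)
  | r :: rs, memo =>
      let p := pvCost matrix m n rem r memo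
      let q := pvCostRows matrix m n rem rs p.2
      (p.1 :: q.1, q.2)

def minimumResistancePath_alt (matrix : List (List Int)) : Int :=
  let m := matrix.length
  let n := (matrix.headD []).length
  (((pvCostRows matrix m n (n - 1) (List.range m) PySem.Dict.empty).1).min?).getD 0

-- ===== PRECONDITION & SPEC =====
-- Pre_ excludes exactly the inputs on which A raises IndexError: an empty matrix or an empty
-- first row (matrix[0] / matrix[i][0]), a row shorter than the first row (matrix[j][i] in the
-- loop), and single-row matrices with ≥ 2 columns (dp[j+1] when m == 1).
def Pre_minimumResistancePath (matrix : List (List Int)) : Prop :=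
  matrix ≠ [] ∧ 1 ≤ (matrix.headD []).length ∧
  (∀ row ∈ matrix, (matrix.headD []).length ≤ row.length) ∧
  (2 ≤ matrix.length ∨ (matrix.headD []).length = 1)
instance (matrix : List (List Int)) : Decidable (Pre_minimumResistancePath matrix) := by
  unfold Pre_minimumResistancePath; infer_instance

def pvWitness_minimumResistancePath : List (List Int) := [[5, 4, 3], [1, 2, 9], [7, 1, 1]]

-- On single-row matrices with at least 2 columns A raises IndexError (dp[j+1] with m == 1),
-- while B returns the row sum, the evident intended value.
def Raises_minimumResistancePath (matrix : List (List Int)) : Prop :=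
  matrix.length = 1 ∧ 2 ≤ (matrix.headD []).length
instance (matrix : List (List Int)) : Decidable (Raises_minimumResistancePath matrix) := by
  unfold Raises_minimumResistancePath; infer_instance
def pvRaiseWitness_minimumResistancePath : List (List Int) := [[1, 2, 3]]
def pvRaiseWitnessOut_minimumResistancePath : Int := 6

def Spec_minimumResistancePath (matrix : List (List Int)) (out : Int) : Prop :=
  out = minimumResistancePath_alt matrix
instance (matrix : List (List Int)) (out : Int) : Decidable (Spec_minimumResistancePath matrix out) := by
  unfold Spec_minimumResistancePath; infer_instance

-- ===== CLAIM (what is proved, stated in full; the proofs are below) =====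
def Claim_equal_minimumResistancePath : Prop := ∀ (matrix : List (List Int)), Dom_minimumResistancePath matrix → Pre_minimumResistancePath matrix → Spec_minimumResistancePath matrix (minimumResistancePath matrix)

def Claim_raises_minimumResistancePath : Prop :=
  (∀ (matrix : List (List Int)), Dom_minimumResistancePath matrix → Raises_minimumResistancePath matrix → ¬ Pre_minimumResistancePath matrix) ∧
  (Dom_minimumResistancePath (pvRaiseWitness_minimumResistancePath) ∧ Raises_minimumResistancePath (pvRaiseWitness_minimumResistancePath) ∧ minimumResistancePath_alt (pvRaiseWitness_minimumResistancePath) = pvRaiseWitnessOut_minimumResistancePath)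

-- ===== LEMMAS AND PROOFS =====

-- entry (row j, column i) of the matrix, as both ports read it
def pvA (matrix : List (List Int)) (j i : Nat) : Int := (matrix.getD j []).getD i 0

-- clamped-neighbor minimum of a row-indexed function (the branch structure of A's step)
def pvNb (m : Nat) (w : Nat → Int) (j : Nat) : Int :=
  if j = 0 then min (w j) (w (j + 1))
  else if j = m - 1 then min (w j) (w (j - 1))
  else min (w j) (min (w (j - 1)) (w (j + 1)))

-- clamped-neighbor minimum as B's cost computes it (two guarded min accumulations)
def pvBest (m : Nat) (w : Nat → Int) (row : Nat) : Int :=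
  let b1 := if 0 < row then min (w row) (w (row - 1)) else w row
  if row < m - 1 then min b1 (w (row + 1)) else b1

-- minimum of f over row indices 0..m-1
def pvMinR (m : Nat) (f : Nat → Int) : Int := (((List.range m).map f).min?).getD 0

-- A's forward DP as a function: pvFA t j = A's dp[j] after processing columns 0..t
def pvFA (matrix : List (List Int)) (m : Nat) : Nat → Nat → Int
  | 0 => fun j => pvA matrix j 0
  | t + 1 => fun j => pvA matrix j (t + 1) + pvNb m (pvFA matrix m t) j

-- the pure value of B's cost: pvS rem row = cost(row, n-1-rem) ignoring the memo
def pvS (matrix : List (List Int)) (m n : Nat) : Nat → Nat → Int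
  | 0 => fun row => pvA matrix row (n - 1)
  | rem + 1 => fun row => pvA matrix row (n - 1 - (rem + 1)) + pvBest m (pvS matrix m n rem) row

-- memo invariant: every stored entry is the pure cost of its cell
def pvMemOK (matrix : List (List Int)) (m n : Nat) (memo : PySem.Dict (Nat × Nat) Int) : Prop :=
  ∀ r c v, memo.get? (r, c) = some v → v = pvS matrix m n (n - 1 - c) r

theorem pvGetD_map_range {m j : Nat} (f : Nat → Int) (h : j < m) :
    ((List.range m).map f).getD j 0 = f j := by
  rw [List.getD_eq_getElem?_getD, List.getElem?_map, List.getElem?_range h]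
  rfl

theorem pvMinR_le {m j : Nat} (f : Nat → Int) (h : j < m) : pvMinR m f ≤ f j := by
  have hmem : f j ∈ (List.range m).map f := List.mem_map_of_mem (List.mem_range.mpr h)
  unfold pvMinR
  cases hm : ((List.range m).map f).min? with
  | none => exact absurd (List.min?_eq_none_iff.mp hm ▸ hmem) (List.not_mem_nil)
  | some a => exact ((List.min?_eq_some_iff.mp hm).2 _ hmem)

theorem pvMinR_attained {m : Nat} (f : Nat → Int) (h : 0 < m) :
    ∃ j, j < m ∧ pvMinR m f = f j := by
  unfold pvMinR
  cases hm : ((List.range m).map f).min? with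
  | none =>
      have : (0:Nat) ∈ List.range m := List.mem_range.mpr h
      exact absurd (List.min?_eq_none_iff.mp hm ▸ List.mem_map_of_mem (f := f) this)
        (List.not_mem_nil)
  | some a =>
      have := (List.min?_eq_some_iff.mp hm).1
      obtain ⟨j, hj, hfj⟩ := List.mem_map.mp this
      exact ⟨j, List.mem_range.mp hj, hfj.symm⟩

theorem pvMinR_congr {m : Nat} {f g : Nat → Int} (h : ∀ j, j < m → f j = g j) :
    pvMinR m f = pvMinR m g := by
  unfold pvMinR
  rw [List.map_congr_left (fun j hj => h j (List.mem_range.mp hj))]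

theorem pvNb_le {m j k : Nat} (w : Nat → Int) (hm : 2 ≤ m) (hj : j < m) (hk : k < m)
    (h1 : j ≤ k + 1) (h2 : k ≤ j + 1) : pvNb m w j ≤ w k := by
  unfold pvNb
  split_ifs with h0 hlast
  · subst h0
    have : k = 0 ∨ k = 1 := by omega
    rcases this with h | h <;> subst h
    · exact min_le_left _ _
    · exact min_le_right _ _
  · have : k = j ∨ k + 1 = j := by omega
    rcases this with h | h
    · subst h; exact min_le_left _ _
    · have : k = j - 1 := by omega
      subst this; exact min_le_right _ _
  · have : k + 1 = j ∨ k = j ∨ k = j + 1 := by omega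
    rcases this with h | h | h
    · have : k = j - 1 := by omega
      subst this
      exact le_trans (min_le_right _ _) (min_le_left _ _)
    · subst h; exact min_le_left _ _
    · subst h; exact le_trans (min_le_right _ _) (min_le_right _ _)

theorem pvNb_attained {m j : Nat} (w : Nat → Int) (hm : 2 ≤ m) (hj : j < m) :
    ∃ k, k < m ∧ j ≤ k + 1 ∧ k ≤ j + 1 ∧ pvNb m w j = w k := by
  unfold pvNb
  split_ifs with h0 hlast
  · subst h0
    rcases min_choice (w 0) (w 1) with h | h
    · exact ⟨0, by omega, by omega, by omega, h⟩
    · exact ⟨1, by omega, by omega, by omega, h⟩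
  · rcases min_choice (w j) (w (j - 1)) with h | h
    · exact ⟨j, hj, by omega, by omega, h⟩
    · exact ⟨j - 1, by omega, by omega, by omega, h⟩
  · have hj1 : j + 1 < m := by omega
    rcases min_choice (w j) (min (w (j - 1)) (w (j + 1))) with h | h
    · exact ⟨j, hj, by omega, by omega, h⟩
    · rcases min_choice (w (j - 1)) (w (j + 1)) with h' | h'
      · exact ⟨j - 1, by omega, by omega, by omega, by rw [h, h']⟩
      · exact ⟨j + 1, hj1, by omega, by omega, by rw [h, h']⟩

theorem pvExchange_le {m : Nat} (u v : Nat → Int) (hm : 2 ≤ m) :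
    pvMinR m (fun j => pvNb m u j + v j) ≤ pvMinR m (fun j => u j + pvNb m v j) := by
  obtain ⟨j0, hj0, hY⟩ := pvMinR_attained (m := m) (fun j => u j + pvNb m v j) (by omega)
  obtain ⟨k0, hk0, ha1, ha2, hnb⟩ := pvNb_attained (w := v) hm hj0
  calc pvMinR m (fun j => pvNb m u j + v j) ≤ pvNb m u k0 + v k0 :=
        pvMinR_le (fun j => pvNb m u j + v j) hk0
    _ ≤ u j0 + v k0 :=
        add_le_add (pvNb_le (w := u) hm hk0 hj0 (by omega) (by omega)) le_rfl
    _ = u j0 + pvNb m v j0 := by rw [hnb]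
    _ = pvMinR m (fun j => u j + pvNb m v j) := hY.symm

theorem pvExchange {m : Nat} (u v : Nat → Int) (hm : 2 ≤ m) :
    pvMinR m (fun j => u j + pvNb m v j) = pvMinR m (fun j => pvNb m u j + v j) := by
  apply le_antisymm _ (pvExchange_le u v hm)
  have h := pvExchange_le v u hm
  calc pvMinR m (fun j => u j + pvNb m v j)
      = pvMinR m (fun j => pvNb m v j + u j) := pvMinR_congr (fun j _ => by ring)
    _ ≤ pvMinR m (fun j => v j + pvNb m u j) := h
    _ = pvMinR m (fun j => pvNb m u j + v j) := pvMinR_congr (fun j _ => by ring)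

theorem pvStepA_map (matrix : List (List Int)) {m : Nat} (f : Nat → Int) (i : Nat)
    (hm : 2 ≤ m) :
    pvStepA matrix m ((List.range m).map f) i
      = (List.range m).map (fun j => pvA matrix j i + pvNb m f j) := by
  unfold pvStepA
  apply List.map_congr_left
  intro j hj
  have hj : j < m := List.mem_range.mp hj
  unfold pvNb pvA
  split_ifs with h0 hlast
  · subst h0
    rw [pvGetD_map_range f hj, pvGetD_map_range f (by omega)]
  · rw [pvGetD_map_range f hj, pvGetD_map_range f (by omega)]
  · rw [pvGetD_map_range f hj, pvGetD_map_range f (by omega),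
        pvGetD_map_range f (by omega)]

theorem pvFoldA (matrix : List (List Int)) {m : Nat} (hm : 2 ≤ m) (t : Nat) :
    (List.range t).foldl (fun dp k => pvStepA matrix m dp (k + 1))
        ((List.range m).map (fun j => pvA matrix j 0))
      = (List.range m).map (pvFA matrix m t) := by
  induction t with
  | zero => rfl
  | succ t ih =>
      rw [List.range_succ, List.foldl_append, ih]
      simp only [List.foldl_cons, List.foldl_nil]
      rw [pvStepA_map matrix (pvFA matrix m t) (t + 1) hm]
      rfl

-- B's guarded min chain equals A's branch structure on rows < m (m ≥ 2)
theorem pvBest_eq_pvNb {m row : Nat} {w w' : Nat → Int} (hm : 2 ≤ m) (hj : row < m)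
    (hw : ∀ k, k < m → w k = w' k) : pvBest m w row = pvNb m w' row := by
  unfold pvBest pvNb
  by_cases h0 : row = 0
  · subst h0
    rw [if_neg (lt_irrefl 0), if_pos (show (0:Nat) < m - 1 by omega), if_pos rfl,
        hw 0 (by omega), hw 1 (by omega)]
  · by_cases hlast : row = m - 1
    · rw [if_pos (by omega : 0 < row), if_neg (by omega : ¬ row < m - 1),
          if_neg h0, if_pos hlast, hw row hj, hw (row - 1) (by omega)]
    · rw [if_pos (by omega : 0 < row), if_pos (by omega : row < m - 1),
          if_neg h0, if_neg hlast, hw row hj, hw (row - 1) (by omega), hw (row + 1) (by omega)]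
      rw [min_comm (w' row) (w' (row - 1)), min_assoc]
      rw [min_comm (w' (row - 1)) (min (w' row) (w' (row + 1))),
          min_assoc, min_comm (w' (row + 1)) (w' (row - 1)), ← min_assoc]

-- A's dp read backwards: pvGB k j = the suffix cost at column n-1-k under A's branch structure
def pvGB (matrix : List (List Int)) (m n : Nat) : Nat → Nat → Int
  | 0 => fun j => pvA matrix j (n - 1)
  | k + 1 => fun j => pvA matrix j (n - 2 - k) + pvNb m (pvGB matrix m n k) j

theorem pvS_eq_pvGB (matrix : List (List Int)) {m : Nat} (n : Nat) (hm : 2 ≤ m) :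
    ∀ rem row, row < m → pvS matrix m n rem row = pvGB matrix m n rem row := by
  intro rem
  induction rem with
  | zero => intro row _; rfl
  | succ rem ih =>
      intro row hrow
      show pvA matrix row (n - 1 - (rem + 1)) + pvBest m (pvS matrix m n rem) row
        = pvA matrix row (n - 2 - rem) + pvNb m (pvGB matrix m n rem) row
      have hc : n - 1 - (rem + 1) = n - 2 - rem := by omega
      rw [hc, pvBest_eq_pvNb hm hrow ih]

-- reduction equations for pvCost's memoized case split
theorem pvCost_succ_some {matrix : List (List Int)} {m n rem row : Nat}
    {memo : PySem.Dict (Nat × Nat) Int} {v : Int}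
    (h : memo.get? (row, n - 1 - (rem + 1)) = some v) :
    pvCost matrix m n (rem + 1) row memo = (v, memo) := by
  simp [pvCost, h]

theorem pvCost_succ_none {matrix : List (List Int)} {m n rem row : Nat}
    {memo : PySem.Dict (Nat × Nat) Int}
    (h : memo.get? (row, n - 1 - (rem + 1)) = none) :
    pvCost matrix m n (rem + 1) row memo =
      (let p0 := pvCost matrix m n rem row memo
       let p1 := if 0 < row then
           let q := pvCost matrix m n rem (row - 1) p0.2
           (min p0.1 q.1, q.2)
         else p0
       let p2 := if row < m - 1 then
           let q := pvCost matrix m n rem (row + 1) p1.2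
           (min p1.1 q.1, q.2)
         else p1
       let v := (matrix.getD row []).getD (n - 1 - (rem + 1)) 0 + p2.1
       (v, p2.2.insert (row, n - 1 - (rem + 1)) v)) := by
  simp [pvCost, h]

-- the memoized recursion computes the pure cost and preserves the memo invariant
theorem pvCost_spec (matrix : List (List Int)) (m n : Nat) :
    ∀ rem, rem ≤ n - 1 → ∀ row memo, pvMemOK matrix m n memo →
      (pvCost matrix m n rem row memo).1 = pvS matrix m n rem row ∧
      pvMemOK matrix m n ((pvCost matrix m n rem row memo).2) := by
  intro rem
  induction rem with
  | zero => intro _ row memo hinv; exact ⟨rfl, hinv⟩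
  | succ rem ih =>
      intro hle row memo hinv
      have hrem : rem ≤ n - 1 := by omega
      cases hget : memo.get? (row, n - 1 - (rem + 1)) with
      | some v =>
          rw [pvCost_succ_some hget]
          refine ⟨?_, hinv⟩
          have := hinv row (n - 1 - (rem + 1)) v hget
          have hc : n - 1 - (n - 1 - (rem + 1)) = rem + 1 := by omega
          rw [this, hc]
      | none =>
          rw [pvCost_succ_none hget]
          obtain ⟨h01, h02⟩ := ih hrem row memo hinv
          -- step 1: optional (row - 1) neighbor
          set p0 := pvCost matrix m n rem row memo with hp0
          have step1 : ∀ (p1 : Int × PySem.Dict (Nat × Nat) Int),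
              p1 = (if 0 < row then
                  let q := pvCost matrix m n rem (row - 1) p0.2
                  (min p0.1 q.1, q.2)
                else p0) →
              p1.1 = (if 0 < row then min (pvS matrix m n rem row) (pvS matrix m n rem (row - 1))
                      else pvS matrix m n rem row) ∧ pvMemOK matrix m n p1.2 := by
            intro p1 hp1
            by_cases hr : 0 < row
            · obtain ⟨hq1, hq2⟩ := ih hrem (row - 1) p0.2 h02
              rw [hp1, if_pos hr, if_pos hr]
              exact ⟨by simp [h01, hq1], hq2⟩
            · rw [hp1, if_neg hr, if_neg hr]
              exact ⟨h01, h02⟩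
          obtain ⟨h11, h12⟩ := step1 _ rfl
          set p1 := (if 0 < row then
              let q := pvCost matrix m n rem (row - 1) p0.2
              (min p0.1 q.1, q.2)
            else p0) with hp1
          -- step 2: optional (row + 1) neighbor
          have step2 : ∀ (p2 : Int × PySem.Dict (Nat × Nat) Int),
              p2 = (if row < m - 1 then
                  let q := pvCost matrix m n rem (row + 1) p1.2
                  (min p1.1 q.1, q.2)
                else p1) →
              p2.1 = pvBest m (pvS matrix m n rem) row ∧ pvMemOK matrix m n p2.2 := by
            intro p2 hp2
            unfold pvBest
            by_cases hr : row < m - 1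
            · obtain ⟨hq1, hq2⟩ := ih hrem (row + 1) p1.2 h12
              rw [hp2, if_pos hr]
              refine ⟨?_, hq2⟩
              simp only [if_pos hr]
              rw [show (pvCost matrix m n rem (row + 1) p1.2).1 = pvS matrix m n rem (row + 1) from hq1] at *
              simp [h11]
            · rw [hp2, if_neg hr]
              simp only [if_neg hr]
              exact ⟨h11, h12⟩
          obtain ⟨h21, h22⟩ := step2 _ rfl
          set p2 := (if row < m - 1 then
              let q := pvCost matrix m n rem (row + 1) p1.2
              (min p1.1 q.1, q.2)
            else p1) with hp2
          constructor
          · show (matrix.getD row []).getD (n - 1 - (rem + 1)) 0 + p2.1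
              = pvS matrix m n (rem + 1) row
            rw [h21]; rfl
          · -- the inserted entry is the pure cost of its cell
            intro r c v hv
            rw [PySem.Dict.get?_insert] at hv
            by_cases hk : (r, c) = (row, n - 1 - (rem + 1))
            · rw [if_pos hk] at hv
              obtain ⟨hr, hc⟩ := Prod.mk.injEq .. ▸ hk
              cases hv
              have hcc : n - 1 - c = rem + 1 := by omega
              rw [hr, hcc]
              show (matrix.getD row []).getD (n - 1 - (rem + 1)) 0 + p2.1
                = pvS matrix m n (rem + 1) row
              rw [h21]; rfl
            · rw [if_neg hk] at hv
              exact h22 r c v hv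

-- the row loop: values are the pure costs, memo invariant preserved
theorem pvCostRows_spec (matrix : List (List Int)) (m n rem : Nat) (hle : rem ≤ n - 1) :
    ∀ rows memo, pvMemOK matrix m n memo →
      (pvCostRows matrix m n rem rows memo).1 = rows.map (pvS matrix m n rem) := by
  intro rows
  induction rows with
  | nil => intro memo _; rfl
  | cons r rs ih =>
      intro memo hinv
      obtain ⟨h1, h2⟩ := pvCost_spec matrix m n rem hle r memo hinv
      show (pvCost matrix m n rem r memo).1
          :: (pvCostRows matrix m n rem rs (pvCost matrix m n rem r memo).2).1
        = pvS matrix m n rem r :: rs.map (pvS matrix m n rem)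
      rw [h1, ih _ h2]

theorem pvMemOK_empty (matrix : List (List Int)) (m n : Nat) :
    pvMemOK matrix m n PySem.Dict.empty := by
  intro r c v hv
  simp [PySem.Dict.get?_empty] at hv

-- B's result is the min of the pure suffix costs over the starting rows
theorem pvAlt_eq_minS (matrix : List (List Int)) :
    minimumResistancePath_alt matrix
      = pvMinR matrix.length (pvS matrix matrix.length ((matrix.headD []).length)
          ((matrix.headD []).length - 1)) := by
  show (((pvCostRows matrix matrix.length ((matrix.headD []).length)
      ((matrix.headD []).length - 1) (List.range matrix.length) PySem.Dict.empty).1).min?).getD 0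
    = _
  unfold pvMinR
  rw [pvCostRows_spec matrix matrix.length ((matrix.headD []).length)
      ((matrix.headD []).length - 1) (le_refl _) (List.range matrix.length)
      PySem.Dict.empty (pvMemOK_empty matrix matrix.length ((matrix.headD []).length))]

-- the exchange invariant: the answer read at column n-1-k is independent of k
theorem pvInvariant (matrix : List (List Int)) {m n : Nat} (hm : 2 ≤ m) :
    ∀ k, k ≤ n - 1 →
      pvMinR m (pvFA matrix m (n - 1))
        = pvMinR m (fun j => pvFA matrix m (n - 1 - k) j + pvGB matrix m n k j
            - pvA matrix j (n - 1 - k)) := by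
  intro k
  induction k with
  | zero =>
      intro _
      apply pvMinR_congr
      intro j _
      simp only [Nat.sub_zero, pvGB]
      ring
  | succ k ih =>
      intro hk
      rw [ih (by omega)]
      have hi : n - 1 - k = (n - 2 - k) + 1 := by omega
      have hi2 : n - 1 - (k + 1) = n - 2 - k := by omega
      rw [hi, hi2]
      calc pvMinR m (fun j => pvFA matrix m ((n - 2 - k) + 1) j + pvGB matrix m n k j
              - pvA matrix j ((n - 2 - k) + 1))
          = pvMinR m (fun j => pvNb m (pvFA matrix m (n - 2 - k)) j + pvGB matrix m n k j) := by
            apply pvMinR_congr; intro j _; simp only [pvFA]; ring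
        _ = pvMinR m (fun j => pvFA matrix m (n - 2 - k) j + pvNb m (pvGB matrix m n k) j) :=
            (pvExchange (pvFA matrix m (n - 2 - k)) (pvGB matrix m n k) hm).symm
        _ = pvMinR m (fun j => pvFA matrix m (n - 2 - k) j + pvGB matrix m n (k + 1) j
              - pvA matrix j (n - 2 - k)) := by
            apply pvMinR_congr; intro j _; simp only [pvGB]; ring

-- ===== VERDICT (by name: the statement is the Claim_ definition above) =====
theorem minimumResistancePath_spec : Claim_equal_minimumResistancePath := by
  intro matrix _ hpre
  obtain ⟨hne, hn1, hrows, hcase⟩ := hpre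
  unfold Spec_minimumResistancePath
  rw [pvAlt_eq_minS]
  by_cases hn : (matrix.headD []).length = 1
  · -- n = 1: no recursion step on B's side, no DP step on A's side; both read column 0
    unfold minimumResistancePath
    simp only [hn, Nat.sub_self, List.range_zero, List.foldl_nil]
    rfl
  · -- n ≥ 2, hence m ≥ 2 by Pre_: pure costs = backward DP, then the exchange invariant
    have hm2 : 2 ≤ matrix.length := by
      rcases hcase with h | h
      · exact h
      · exact absurd h hn
    unfold minimumResistancePath
    simp only []
    rw [show (fun i => (matrix.getD i []).getD 0 0) = (fun j => pvA matrix j 0) from rfl]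
    rw [pvFoldA matrix hm2 ((matrix.headD []).length - 1)]
    show pvMinR matrix.length (pvFA matrix matrix.length ((matrix.headD []).length - 1))
      = pvMinR matrix.length (pvS matrix matrix.length ((matrix.headD []).length)
          ((matrix.headD []).length - 1))
    rw [pvMinR_congr (fun j hj => pvS_eq_pvGB matrix ((matrix.headD []).length) hm2
        ((matrix.headD []).length - 1) j hj)]
    rw [pvInvariant matrix hm2 ((matrix.headD []).length - 1) (le_refl _)]
    apply pvMinR_congr
    intro j _
    have : (matrix.headD []).length - 1 - ((matrix.headD []).length - 1) = 0 := by omega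
    rw [this]
    simp only [pvFA]
    ring

@[simp] theorem minimumResistancePath_raises : Claim_raises_minimumResistancePath := by
  unfold Claim_raises_minimumResistancePath
  constructor
  · intro matrix _ hr hpre
    obtain ⟨h1, h2⟩ := hr
    obtain ⟨_, _, _, h4⟩ := hpre
    omega
  · exact ⟨by decide, by decide, by decide⟩
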